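-- pv_equiv track=rewrite | github.com/msampaio/rpScripts | src/rpc.py | pretty_partition_from_list
-- ===== SOURCE A (Python) =====
-- def pretty_partition_from_list(seq):
--     if not seq:
--         return '0'
--     dic = {}
--     for el in seq:
--         if el not in dic.keys():
--             dic[el] = 0
--         dic[el] += 1
--     partition =  '.'.join([str(k) if v < 2 else '{}^{}'.format(k, v)
--         for k, v in sorted(dic.items())
--     ])
--
--     return partition
-- ===== SOURCE B (Python) =====
-- def pretty_partition_from_list(seq):
--     if not seq:
--         return '0'
--     s = sorted(seq)
--     parts = []
--     run_val, run_len = s[0], 1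
--     for x in s[1:]:
--         if x == run_val:
--             run_len += 1
--         else:
--             parts.append(str(run_val) if run_len < 2 else '{}^{}'.format(run_val, run_len))
--             run_val, run_len = x, 1
--     parts.append(str(run_val) if run_len < 2 else '{}^{}'.format(run_val, run_len))
--     return '.'.join(parts)
-- ===== Notes on version B (the rewrite author's own statement) =====
-- stated objective: faster
-- what changed: Replaces A's frequency dict plus sorted(dic.items()) with a single sort of the sequence followed by one run-length scan that emits each part directly.
import Mathlib
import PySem

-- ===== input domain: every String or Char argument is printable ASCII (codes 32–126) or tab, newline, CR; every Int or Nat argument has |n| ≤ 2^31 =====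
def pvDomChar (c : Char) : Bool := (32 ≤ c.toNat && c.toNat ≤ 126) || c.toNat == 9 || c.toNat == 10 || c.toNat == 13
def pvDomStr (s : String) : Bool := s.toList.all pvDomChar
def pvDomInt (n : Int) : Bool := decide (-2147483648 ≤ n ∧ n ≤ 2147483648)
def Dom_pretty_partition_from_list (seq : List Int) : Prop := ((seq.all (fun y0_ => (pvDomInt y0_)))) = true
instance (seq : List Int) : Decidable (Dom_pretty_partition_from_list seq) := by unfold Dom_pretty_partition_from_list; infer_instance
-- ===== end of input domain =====

-- B replaces A's count-dict + sorted(items) by sort-once + one run-length scan (different algorithm; a timing run measured B faster).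

-- ===== PORT A =====
-- '{}^{}'.format(k, v) branch of the comprehension, over an item pair
def pvFmtA (p : Int × Int) : String :=
  if p.2 < 2 then PySem.Int.toStr p.1 else PySem.Int.toStr p.1 ++ "^" ++ PySem.Int.toStr p.2

-- body of A's counting loop: 'if el not in dic.keys(): dic[el] = 0' then 'dic[el] += 1'
def pvStepA (d : PySem.Dict Int Int) (el : Int) : PySem.Dict Int Int :=
  let d1 := if d.contains el then d else d.insert el 0
  d1.insert el (d1.getD el 0 + 1)

def pretty_partition_from_list (seq : List Int) : String :=
  if seq = [] then "0"
  else
    let dic := seq.foldl pvStepA PySem.Dict.empty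
    PySem.Str.join "." ((PySem.List.sorted2 dic.items Prod.fst Prod.snd).map pvFmtA)

-- ===== PORT B =====
-- str(run_val) if run_len < 2 else '{}^{}'.format(run_val, run_len)
def pvFmtB (k c : Int) : String :=
  if c < 2 then PySem.Int.toStr k else PySem.Int.toStr k ++ "^" ++ PySem.Int.toStr c

-- the run-length scan over s[1:] carrying (run_val, run_len), emitting a part at each run boundary
def pvRunAux (k c : Int) : List Int → List String
  | [] => [pvFmtB k c]
  | x :: xs => if x = k then pvRunAux k (c + 1) xs else pvFmtB k c :: pvRunAux x 1 xs

def pretty_partition_from_list_alt (seq : List Int) : String :=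
  if seq = [] then "0"
  else
    match PySem.List.sorted seq (fun x => x) with
    | [] => "0"   -- unreachable: sorted of a non-empty list is non-empty
    | k :: t => PySem.Str.join "." (pvRunAux k 1 t)

-- ===== PRECONDITION & SPEC =====
def Spec_pretty_partition_from_list (seq : List Int) (out : String) : Prop := out = pretty_partition_from_list_alt seq
instance (seq : List Int) (out : String) : Decidable (Spec_pretty_partition_from_list seq out) := by unfold Spec_pretty_partition_from_list; infer_instance

-- ===== CLAIM (what is proved, stated in full; the proofs are below) =====
def Claim_equal_pretty_partition_from_list : Prop := ∀ (seq : List Int), Dom_pretty_partition_from_list seq → Spec_pretty_partition_from_list seq (pretty_partition_from_list seq)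

-- ===== LEMMAS AND PROOFS =====

-- A's loop body is exactly the Counter step
lemma pvStepA_eq (d : PySem.Dict Int Int) (el : Int) :
    pvStepA d el = d.insert el (d.getD el 0 + 1) := by
  unfold pvStepA
  by_cases h : d.contains el
  · simp [h]
  · have hfalse : d.contains el = false := by simpa using h
    have hnot : ∀ p ∈ d.items, ¬ (p.1 == el) = true := by
      simpa [PySem.Dict.contains, List.any_eq_false] using hfalse
    have hget : d.getD el 0 = 0 := by
      simp [PySem.Dict.getD, PySem.Dict.get?, List.find?_eq_none.mpr hnot]
    have hget0 : (d.insert el 0).getD el 0 = 0 := by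
      simp [PySem.Dict.getD, PySem.Dict.get?_insert_self]
    rw [if_neg h]
    show (d.insert el 0).insert el ((d.insert el 0).getD el 0 + 1) = d.insert el (d.getD el 0 + 1)
    rw [hget0, hget]
    -- (d.insert el 0).insert el 1 = d.insert el 1 when el is fresh
    apply PySem.Dict.ext
    simp only [PySem.Dict.insert, hfalse]
    have hc : ((PySem.Dict.mk (d.items ++ [(el, (0 : Int))])).contains el) = true := by
      simp [PySem.Dict.contains]
    simp only [if_neg (by simp : ¬ (false = true)), hc]
    simp only [List.map_append]
    have hmap : List.map (fun p => if p.1 = el then (el, (1:Int)) else p) d.items = d.items := by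
      conv_rhs => rw [← List.map_id d.items]
      refine List.map_congr_left fun p hp => ?_
      have hne : ¬ p.1 = el := by simpa using hnot p hp
      simp [hne]
    simp [hmap]

-- A's whole loop is Counter(seq)
lemma pvLoopA_eq_counter (seq : List Int) :
    seq.foldl pvStepA PySem.Dict.empty = PySem.Dict.counter seq := by
  have h : pvStepA = fun d x => d.insert x (d.getD x 0 + 1) :=
    funext fun d => funext fun x => pvStepA_eq d x
  rw [h, PySem.Dict.foldl_insert_getD_add_one_eq_counter]

-- the two comparison predicates sorted2 / sorted use on pairs
def pvB2 (a b : Int × Int) : Bool :=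
  decide (a.1 < b.1) || (!decide (b.1 < a.1) && decide (a.2 < b.2))
def pvB1 (a b : Int × Int) : Bool := decide (a.1 < b.1)

lemma pvB2_eq_pvB1 (x y : Int × Int) (h : x.1 ≠ y.1) : pvB2 x y = pvB1 x y := by
  unfold pvB2 pvB1
  by_cases h1 : x.1 < y.1
  · simp [h1]
  · have h2 : y.1 < x.1 := lt_of_le_of_ne (not_lt.mp h1) h.symm
    simp [h1, h2]

lemma pvInsertBy_congr (x : Int × Int) :
    ∀ (acc : List (Int × Int)), (∀ y ∈ acc, x.1 ≠ y.1) →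
      PySem.List.insertBy pvB2 x acc = PySem.List.insertBy pvB1 x acc := by
  intro acc
  induction acc with
  | nil => intro _; rfl
  | cons y ys ih =>
      intro h
      rw [PySem.List.insertBy.eq_2, PySem.List.insertBy.eq_2,
          pvB2_eq_pvB1 x y (h y (List.mem_cons_self ..))]
      cases hb : pvB1 x y with
      | true => simp
      | false =>
          simp only [Bool.false_eq_true, if_false]
          rw [ih (fun z hz => h z (List.mem_cons_of_mem _ hz))]

lemma pvFoldl_insertBy_congr :
    ∀ (xs acc : List (Int × Int)), ((acc ++ xs).map Prod.fst).Nodup →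
      xs.foldl (fun a x => PySem.List.insertBy pvB2 x a) acc
        = xs.foldl (fun a x => PySem.List.insertBy pvB1 x a) acc := by
  intro xs
  induction xs with
  | nil => intro acc _; rfl
  | cons x xs' ih =>
      intro acc hnd
      have hperm0 : (acc ++ x :: xs').Perm (x :: (acc ++ xs')) := List.perm_middle
      have hnd' : ((x :: (acc ++ xs')).map Prod.fst).Nodup := ((hperm0.map Prod.fst).nodup_iff).mp hnd
      have hnd2 : (x.1 :: (acc ++ xs').map Prod.fst).Nodup := by
        simpa [List.map_cons] using hnd'
      have hx : ∀ y ∈ acc, x.1 ≠ y.1 := by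
        intro y hy hxy
        exact (List.nodup_cons.mp hnd2).1
          (by rw [hxy]; exact List.mem_map_of_mem (List.mem_append_left _ hy))
      simp only [List.foldl_cons]
      rw [pvInsertBy_congr x acc hx]
      apply ih
      have hp : (PySem.List.insertBy pvB1 x acc ++ xs').Perm (acc ++ x :: xs') :=
        ((PySem.List.insertBy_perm pvB1 x acc).append_right xs').trans List.perm_middle.symm
      exact ((hp.map Prod.fst).nodup_iff).mpr hnd

-- sorting pairs with distinct first components by the tuple order is sorting by the first component
lemma pvSorted2_eq_sorted (xs : List (Int × Int)) (h : (xs.map Prod.fst).Nodup) :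
    PySem.List.sorted2 xs Prod.fst Prod.snd = PySem.List.sorted xs Prod.fst := by
  rw [PySem.List.sorted_eq_foldl_insertBy]
  show xs.foldl (fun a x => PySem.List.insertBy pvB2 x a) [] = _
  rw [pvFoldl_insertBy_congr xs [] (by simpa using h)]
  rfl

-- helper naming B's whole scan (s[0] seeded with run_len = 1)
def pvRuns : List Int → List String
  | [] => []
  | k :: t => pvRunAux k 1 t

-- peeling one run off the front of a sorted list
lemma pvRunAux_head (t : List Int) (k c : Int) (hp : (k :: t).Pairwise (· ≤ ·)) :
    pvRunAux k c t = pvFmtB k (c + (t.count k : Int)) :: pvRuns (t.dropWhile (· == k)) := by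
  induction t generalizing c with
  | nil => simp [pvRunAux, pvRuns]
  | cons x xs ih =>
      have hkx : k ≤ x := (List.pairwise_cons.mp hp).1 x (List.mem_cons_self ..)
      have hxxs : ∀ y ∈ xs, x ≤ y := (List.pairwise_cons.mp (List.pairwise_cons.mp hp).2).1
      by_cases hx : x = k
      · subst hx
        have hp' : (x :: xs).Pairwise (· ≤ ·) := by
          refine List.pairwise_cons.mpr ⟨hxxs, (List.pairwise_cons.mp (List.pairwise_cons.mp hp).2).2⟩
        rw [show pvRunAux x c (x :: xs) = pvRunAux x (c + 1) xs by simp [pvRunAux]]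
        rw [ih (c + 1) hp']
        have : (x :: xs).count x = xs.count x + 1 := by simp
        simp only [this, List.dropWhile_cons, BEq.rfl]
        congr 1
        push_cast
        ring_nf
      · have hkx' : k < x := lt_of_le_of_ne hkx (fun h => hx h.symm)
        have hnm : k ∉ x :: xs := by
          intro hm
          rcases List.mem_cons.mp hm with h | h
          · exact hx h.symm
          · exact absurd (hxxs k h) (by omega)
        have hcnt : (x :: xs).count k = 0 := List.count_eq_zero.mpr hnm
        rw [show pvRunAux k c (x :: xs) = pvFmtB k c :: pvRunAux x 1 xs by simp [pvRunAux, hx]]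
        simp [hcnt, hx, pvRuns]

-- B's scan over a sorted list yields exactly one part per distinct value, in increasing order
lemma pvRuns_spec :
    ∀ (K l : List Int), K.Pairwise (· < ·) → l.Pairwise (· ≤ ·) → (∀ x, x ∈ K ↔ x ∈ l) →
      pvRuns l = K.map (fun x => pvFmtB x (l.count x)) := by
  intro K
  induction K with
  | nil =>
      intro l _ _ hmem
      have : l = [] := by
        cases l with
        | nil => rfl
        | cons a t => exact absurd ((hmem a).mpr (List.mem_cons_self ..)) (by simp)
      simp [this, pvRuns]
  | cons k K' ih =>
      intro l hK hl hmem
      have hkl : k ∈ l := (hmem k).mp (List.mem_cons_self ..)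
      obtain ⟨h, t, rfl⟩ : ∃ h t, l = h :: t := by
        cases l with
        | nil => exact absurd hkl (by simp)
        | cons a t => exact ⟨a, t, rfl⟩
      have hhead : ∀ y ∈ h :: t, h ≤ y := by
        intro y hy
        rcases List.mem_cons.mp hy with h' | h'
        · omega
        · exact (List.pairwise_cons.mp hl).1 y h'
      have hK1 := List.pairwise_cons.mp hK
      have hh : h = k := by
        have hhK : h ∈ k :: K' := (hmem h).mpr (List.mem_cons_self ..)
        rcases List.mem_cons.mp hhK with h' | h'
        · exact h'
        · have : k < h := hK1.1 h h'
          have : h ≤ k := hhead k hkl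
          omega
      subst hh
      set r := t.dropWhile (· == h) with hr
      have hsplit : t.takeWhile (· == h) ++ r = t := List.takeWhile_append_dropWhile
      have htake : ∀ y ∈ t.takeWhile (· == h), y = h := by
        intro y hy
        simpa using List.mem_takeWhile_imp hy
      have htP : t.Pairwise (· ≤ ·) := (List.pairwise_cons.mp hl).2
      have hrP : r.Pairwise (· ≤ ·) := List.Pairwise.sublist (List.dropWhile_sublist _) htP
      have hrne : ∀ x ∈ r, x ≠ h := by
        intro x hx
        cases hre : r with
        | nil => rw [hre] at hx; simp at hx
        | cons y ys =>
            have hy : ¬ (y == h) = true := by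
              have := List.head?_dropWhile_not (· == h) t
              rw [← hr, hre] at this; simpa using this
            have hyh : y ≠ h := by simpa using hy
            rw [hre] at hx
            rcases List.mem_cons.mp hx with h' | h'
            · exact h'.symm ▸ hyh
            · intro hxh
              have h1 : y ≤ x := (List.pairwise_cons.mp (hre ▸ hrP)).1 x h'
              have h2 : h ≤ y := hhead y (by
                have : y ∈ t := (List.dropWhile_sublist _).mem (hre ▸ List.mem_cons_self ..)
                exact List.mem_cons_of_mem _ this)
              omega
      have hrt : ∀ x ∈ r, x ∈ t := fun x hx => (List.dropWhile_sublist _).mem hx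
      have hmem' : ∀ x, x ∈ K' ↔ x ∈ r := by
        intro x
        constructor
        · intro hx
          have hxk : h < x := hK1.1 x hx
          have hxl : x ∈ h :: t := (hmem x).mp (List.mem_cons_of_mem _ hx)
          have hxt : x ∈ t := by
            rcases List.mem_cons.mp hxl with h' | h'
            · omega
            · exact h'
          rw [← hsplit] at hxt
          rcases List.mem_append.mp hxt with h' | h'
          · exact absurd (htake x h') (by omega)
          · exact h'
        · intro hx
          have hxK : x ∈ h :: K' :=
            (hmem x).mpr (List.mem_cons_of_mem _ (hrt x hx))
          rcases List.mem_cons.mp hxK with h' | h'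
          · exact absurd h' (hrne x hx)
          · exact h'
      have hcnt : ∀ x ∈ K', ((h :: t).count x : Int) = (r.count x : Int) := by
        intro x hx
        have hxh : x ≠ h := by
          have : h < x := hK1.1 x hx
          omega
        have h1 : (h :: t).count x = t.count x := by
          simp [Ne.symm hxh]
        have h2 : t.count x = r.count x := by
          rw [← hsplit, List.count_append]
          have : (t.takeWhile (· == h)).count x = 0 :=
            List.count_eq_zero.mpr (fun hm => hxh (htake x hm))
          omega
        rw [h1, h2]
      rw [show pvRuns (h :: t) = pvRunAux h 1 t from rfl, pvRunAux_head t h 1 hl]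
      rw [List.map_cons]
      congr 1
      · congr 1
        have : (h :: t).count h = t.count h + 1 := by simp
        rw [this]; push_cast; ring
      · rw [ih r hK1.2 hrP hmem']
        exact (List.map_congr_left (fun x hx => by rw [hcnt x hx])).symm

-- the canonical key list both sides sort into
lemma pvA_nonempty (seq : List Int) (hne : seq ≠ []) :
    pretty_partition_from_list seq
      = PySem.Str.join "."
          ((PySem.List.sorted (PySem.Set.ofList seq) (fun x => x)).map
            (fun k => pvFmtB k (seq.count k : Int))) := by
  unfold pretty_partition_from_list
  rw [if_neg hne]
  simp only [pvLoopA_eq_counter, PySem.Dict.items_counter]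
  set K := PySem.List.sorted (PySem.Set.ofList seq) (fun x => x) with hK
  have hnd : (((PySem.Set.ofList seq).map (fun k => (k, (seq.count k : Int)))).map Prod.fst).Nodup := by
    rw [List.map_map]
    have hid : (Prod.fst ∘ fun k => (k, (seq.count k : Int))) = id := rfl
    rw [hid, List.map_id]
    exact PySem.Set.nodup_ofList seq
  rw [pvSorted2_eq_sorted _ hnd]
  have hKlt : K.Pairwise (· < ·) := PySem.List.sorted_ofList_pairwise_lt seq
  have hperm : (K.map (fun k => (k, (seq.count k : Int)))).Perm
      ((PySem.Set.ofList seq).map (fun k => (k, (seq.count k : Int)))) :=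
    (PySem.List.sorted_perm (PySem.Set.ofList seq) (fun x => x) false).map _
  have hpw : (K.map (fun k => (k, (seq.count k : Int)))).Pairwise (fun a b => a.1 < b.1) := by
    rw [List.pairwise_map]
    exact hKlt
  rw [PySem.List.sorted_eq_of_perm_of_pairwise_lt _ _ _ hperm hpw]
  rw [List.map_map]
  rfl

lemma pvB_nonempty (seq : List Int) (hne : seq ≠ []) :
    pretty_partition_from_list_alt seq
      = PySem.Str.join "."
          ((PySem.List.sorted (PySem.Set.ofList seq) (fun x => x)).map
            (fun k => pvFmtB k (seq.count k : Int))) := by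
  unfold pretty_partition_from_list_alt
  rw [if_neg hne]
  have hlp : (PySem.List.sorted seq (fun x => x)).Pairwise (· ≤ ·) := by
    have := PySem.List.sorted_pairwise seq (fun x => x)
    simpa using this
  have hmem : ∀ x, x ∈ PySem.List.sorted (PySem.Set.ofList seq) (fun x => x)
      ↔ x ∈ PySem.List.sorted seq (fun x => x) := by
    intro x
    rw [PySem.List.mem_sorted, PySem.List.mem_sorted, PySem.Set.mem_ofList]
  have hruns := pvRuns_spec (PySem.List.sorted (PySem.Set.ofList seq) (fun x => x))
      (PySem.List.sorted seq (fun x => x))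
      (PySem.List.sorted_ofList_pairwise_lt seq) hlp hmem
  have hcnt : ∀ x, (PySem.List.sorted seq (fun x => x)).count x = seq.count x :=
    fun x => (PySem.List.sorted_perm seq (fun x => x) false).count_eq x
  cases hs : PySem.List.sorted seq (fun x => x) with
  | nil => exact absurd ((PySem.List.sorted_eq_nil_iff seq (fun x => x) false).mp hs) hne
  | cons k t =>
      show PySem.Str.join "." (pvRunAux k 1 t) = _
      rw [show pvRunAux k 1 t = pvRuns (k :: t) from rfl, ← hs, hruns]
      congr 1
      exact List.map_congr_left (fun x _ => by rw [hcnt x])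

-- ===== VERDICT (by name: the statement is the Claim_ definition above) =====
theorem pretty_partition_from_list_spec : Claim_equal_pretty_partition_from_list := by
  intro seq _
  unfold Spec_pretty_partition_from_list
  by_cases hne : seq = []
  · subst hne; rfl
  · rw [pvA_nonempty seq hne, pvB_nonempty seq hne]
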